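-- pv_equiv track=rewrite | github.com/gdrtodd/gavel | utils.py | format_single_line_game
-- ===== SOURCE A (Python) =====
-- ADDITIONAL_SPACING_TOKENS = ["equipment", "rules", "phase", "end"]
--
-- def get_current_parenthetical(game: str):
--     '''
--     Returns the final open parenthetical in the game string, or the empty string
--     if no such parenthetical exists
--     '''
--     for i in range(1, len(game) + 1):
--         sub = game[-i:]
--         if sub.count("(") > sub.count(")"):
--             return sub
--
--     return ""
--
-- def format_single_line_game(game: str):
--     '''
--     Like the above function, except that every ludeme is on its own line except for leaf nodes
--     '''
--     new_game = "("
--     inside_quotes = False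
--
--     for i in range(1, len(game)):
--         c = game[i]
--
--         if c == '"':
--             inside_quotes = not inside_quotes
--
--         if not inside_quotes:
--             # Each ludeme goes on a new line
--             if c == '(':
--                 new_game += "\n"
--
--             # Closing parentheses go on a new line unless there's only one open parenthetical
--             current_parenthical = get_current_parenthetical(new_game)
--             if c == ')' and current_parenthical.count('(') > 1:
--                 new_game += "\n"
--
--             new_game += c
--
--             if c == ')':
--                 new_game += "\n"
--
--         else:
--             new_game += c
--
--     return indent_game(new_game)
--
-- def indent_game(game: str):
--
--     lines = [line for line in game.split("\n") if line.strip()!= ""]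
--
--     # Left justify all lines
--     for i in range(len(lines)):
--         line = lines[i]
--         count = 0
--         while count < len(line) and (line[count] == ' ' or line[count] == '\t'):
--             line = line[1:]
--         lines[i] = line
--
--     indent_lines(lines)
--
--     # Apply additional spacing
--     for i in range(len(lines)):
--         line = lines[i]
--         if any([line.strip()[1:].startswith(token) for token in ADDITIONAL_SPACING_TOKENS]):
--             lines[i] = "\n" + line
--
--     return "\n".join(lines)
--
-- def indent_lines(lines):
--     indent = 0
--     for i in range(len(lines)):
--         line = lines[i]
--         num_open = line.count('(') + line.count('{')
--         num_close = line.count(')') + line.count('}')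
--         difference = num_open - num_close
--
--         if difference < 0:
--             indent += difference
--             if indent < 0:
--                 indent = 0
--
--         for _ in range(indent):
--             line = "    " + line
--
--         lines[i] = line
--
--         if difference > 0:
--             indent += difference
-- ===== SOURCE B (Python) =====
-- ADDITIONAL_SPACING_TOKENS = ["equipment", "rules", "phase", "end"]
--
-- def format_single_line_game(game: str):
--     '''
--     One-pass reformatter: a stack of per-unmatched-paren nesting flags
--     replaces A's quadratic rescans of the suffix, then a single fused pass
--     splits, left-justifies, indents and spaces the lines.
--     '''
--     parts = ["("]
--     stack = [False]  # per unmatched '(' : nested opener appended after it?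
--     inside_quotes = False
--     for c in game[1:]:
--         if c == '"':
--             inside_quotes = not inside_quotes
--         if inside_quotes:
--             parts.append(c)
--         else:
--             if c == '(':
--                 parts.append('\n')
--             elif c == ')' and stack and stack[-1]:
--                 parts.append('\n')
--             parts.append(c)
--             if c == ')':
--                 parts.append('\n')
--         # every appended character takes part in the paren bookkeeping
--         if c == '(':
--             if stack:
--                 stack[-1] = True
--             stack.append(False)
--         elif c == ')':
--             if stack:
--                 stack.pop()
--     out = []
--     indent = 0
--     for raw in "".join(parts).split("\n"):
--         if raw.strip() == "":
--             continue
--         line = raw.lstrip(" \t")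
--         diff = (line.count('(') + line.count('{')) - (line.count(')') + line.count('}'))
--         if diff < 0:
--             indent = max(indent + diff, 0)
--         text = "    " * indent + line
--         if line.strip()[1:].startswith(("equipment", "rules", "phase", "end")):
--             text = "\n" + text
--         out.append(text)
--         if diff > 0:
--             indent += diff
--     return "\n".join(out)
-- ===== Notes on version B (the rewrite author's own statement) =====
-- stated objective: faster
-- what changed: Replaces get_current_parenthetical's rescan of every suffix of the growing output at each character (and the triple pass over lines) with an incrementally maintained stack of per-open-paren nesting flags plus one fused pass that filters, left-justifies, indents and spaces the lines.
import Mathlib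
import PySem

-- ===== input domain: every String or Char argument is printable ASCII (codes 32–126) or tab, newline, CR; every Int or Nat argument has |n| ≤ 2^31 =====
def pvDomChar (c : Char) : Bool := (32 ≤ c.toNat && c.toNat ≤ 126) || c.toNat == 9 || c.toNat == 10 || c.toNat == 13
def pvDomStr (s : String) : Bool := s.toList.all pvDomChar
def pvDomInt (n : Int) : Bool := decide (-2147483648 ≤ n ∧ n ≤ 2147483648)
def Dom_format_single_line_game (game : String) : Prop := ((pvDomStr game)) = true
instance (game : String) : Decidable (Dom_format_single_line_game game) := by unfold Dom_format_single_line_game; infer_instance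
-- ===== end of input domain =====

-- B replaces A's per-character rescan of every suffix of the growing output (and A's three
-- passes over the lines) by an incrementally maintained paren stack and one fused line pass;
-- a timing run measured B asymptotically faster.

-- ===== PORT A =====
def ADDITIONAL_SPACING_TOKENS : List String := ["equipment", "rules", "phase", "end"]

-- the for-loop of get_current_parenthetical: i runs from 1 while i ≤ len(game); early return
def get_current_parenthetical_go (game : List Char) (i : Nat) : List Char :=
  if i ≤ game.length then
    let sub := PySem.List.slice game (some (-(i : Int))) none
    if sub.count '(' > sub.count ')' then sub
    else get_current_parenthetical_go game (i + 1)
  else []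
termination_by game.length + 1 - i

def get_current_parenthetical (game : List Char) : List Char :=
  get_current_parenthetical_go game 1

-- one iteration of the main for-loop of format_single_line_game; state = (new_game, inside_quotes)
def fslg_step (st : List Char × Bool) (c : Char) : List Char × Bool :=
  let q := if c = '"' then !st.2 else st.2
  if q = false then
    let ng1 := if c = '(' then st.1 ++ ['\n'] else st.1
    let cp := get_current_parenthetical ng1
    let ng2 := if c = ')' ∧ cp.count '(' > 1 then ng1 ++ ['\n'] else ng1
    let ng3 := ng2 ++ [c]
    let ng4 := if c = ')' then ng3 ++ ['\n'] else ng3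
    (ng4, q)
  else (st.1 ++ [c], q)

-- the count-stays-0 while loop in indent_game strips leading ' '/'\t' one char at a time
def left_justify : List Char → List Char
  | [] => []
  | c :: t => if c = ' ' ∨ c = '\t' then left_justify t else c :: t

-- "for _ in range(indent): line = '    ' + line"
def pvPadA : Nat → List Char → List Char
  | 0, l => l
  | n + 1, l => pvPadA n ("    ".toList ++ l)

def pvDiffA (l : List Char) : Int :=
  ((l.count '(' + l.count '{' : Nat) : Int) - ((l.count ')' + l.count '}' : Nat) : Int)

def indent_lines_go (indent : Int) : List (List Char) → List (List Char)
  | [] => []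
  | l :: ls =>
    let diff := pvDiffA l
    let indent1 := if diff < 0 then (if indent + diff < 0 then 0 else indent + diff) else indent
    let l' := pvPadA indent1.toNat l
    let indent2 := if diff > 0 then indent1 + diff else indent1
    l' :: indent_lines_go indent2 ls

def spacingA (l : List Char) : List Char :=
  if (ADDITIONAL_SPACING_TOKENS.map String.toList).any
      (fun t => PySem.Chars.startswith ((PySem.Chars.strip l).drop 1) t) then '\n' :: l else l

def indent_game (g : List Char) : String :=
  let lines := (PySem.Chars.splitOn g ['\n']).filter (fun l => PySem.Chars.strip l != ([] : List Char))
  let lines := lines.map left_justify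
  let lines := indent_lines_go 0 lines
  let lines := lines.map spacingA
  String.mk (PySem.Chars.join ['\n'] lines)

def format_single_line_game (game : String) : String :=
  indent_game ((game.toList.drop 1).foldl fslg_step (['('], false)).1

-- ===== PORT B =====
-- per unmatched open paren, a flag: was a nested opener appended after it?
def pvPush (st : List Bool) (c : Char) : List Bool :=
  if c = '(' then
    match st with
    | [] => [false]
    | _ :: t => false :: true :: t
  else if c = ')' then st.tail
  else st

-- one iteration of B's loop; state = (parts, inside_quotes, stack)
def fslg_alt_step (st : List Char × Bool × List Bool) (c : Char) : List Char × Bool × List Bool :=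
  let q := if c = '"' then !st.2.1 else st.2.1
  let out :=
    if q then st.1 ++ [c]
    else
      let o1 := if c = '(' then st.1 ++ ['\n']
                else if c = ')' ∧ st.2.2.headD false = true then st.1 ++ ['\n']
                else st.1
      let o2 := o1 ++ [c]
      if c = ')' then o2 ++ ['\n'] else o2
  (out, q, pvPush st.2.2 c)

-- B's single fused pass over the raw lines: filter, lstrip, indent, extra spacing
def alt_lines_go (indent : Int) : List (List Char) → List (List Char)
  | [] => []
  | raw :: rest =>
    if PySem.Chars.strip raw == ([] : List Char) then alt_lines_go indent rest
    else
      let line := raw.dropWhile (fun c => c == ' ' || c == '\t')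
      let diff : Int := ((line.count '(' + line.count '{' : Nat) : Int)
                        - ((line.count ')' + line.count '}' : Nat) : Int)
      let indent1 := if diff < 0 then max (indent + diff) 0 else indent
      let text := (List.replicate indent1.toNat "    ".toList).flatten ++ line
      let text2 := if (["equipment", "rules", "phase", "end"].map String.toList).any
          (fun t => PySem.Chars.startswith ((PySem.Chars.strip line).drop 1) t)
        then '\n' :: text else text
      let indent2 := if diff > 0 then indent1 + diff else indent1
      text2 :: alt_lines_go indent2 rest

def format_single_line_game_alt (game : String) : String :=
  let st := (game.toList.drop 1).foldl fslg_alt_step (['('], false, [false])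
  String.mk (PySem.Chars.join ['\n'] (alt_lines_go 0 (PySem.Chars.splitOn st.1 ['\n'])))

-- ===== PRECONDITION & SPEC =====
def Spec_format_single_line_game (game : String) (out : String) : Prop := out = format_single_line_game_alt game
instance (game : String) (out : String) : Decidable (Spec_format_single_line_game game out) := by unfold Spec_format_single_line_game; infer_instance

-- ===== CLAIM (what is proved, stated in full; the proofs are below) =====
def Claim_equal_format_single_line_game : Prop := ∀ (game : String), Dom_format_single_line_game game → Spec_format_single_line_game game (format_single_line_game game)

-- ===== LEMMAS AND PROOFS =====

-- paren balance of a chunk of text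
def pvBal (l : List Char) : Int := (l.count '(' : Int) - (l.count ')' : Int)

-- proof-side: shortest prefix of r (= the reversed text) whose balance reaches k
def pvGo : Nat → List Char → Option (List Char)
  | _, [] => none
  | k, c :: t =>
    if c = '(' then (if k ≤ 1 then some [c] else (pvGo (k - 1) t).map (c :: ·))
    else if c = ')' then (pvGo (k + 1) t).map (c :: ·)
    else (pvGo k t).map (c :: ·)

-- the flag stack read off the reversed text
def pvStR (r : List Char) : List Bool := r.foldr (fun c st => pvPush st c) []

lemma pvBal_nil : pvBal [] = 0 := by simp [pvBal]

lemma pvBal_cons (c : Char) (l : List Char) :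
    pvBal (c :: l) = (if c = '(' then 1 else if c = ')' then -1 else 0) + pvBal l := by
  simp only [pvBal, List.count_cons]
  split_ifs with h1 h2 <;> simp_all <;> push_cast <;> ring

lemma pvGo_open (k : Nat) (t : List Char) :
    pvGo k ('(' :: t) = if k ≤ 1 then some ['('] else (pvGo (k - 1) t).map ('(' :: ·) := by
  simp [pvGo]

lemma pvGo_close (k : Nat) (t : List Char) :
    pvGo k (')' :: t) = (pvGo (k + 1) t).map (')' :: ·) := by
  simp [pvGo]

lemma pvGo_other (k : Nat) (t : List Char) (c : Char) (h1 : c ≠ '(') (h2 : c ≠ ')') :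
    pvGo k (c :: t) = (pvGo k t).map (c :: ·) := by
  simp [pvGo, h1, h2]

lemma pvStR_cons (c : Char) (t : List Char) : pvStR (c :: t) = pvPush (pvStR t) c := rfl

lemma pvPush_length_open (st : List Bool) : (pvPush st '(').length = st.length + 1 := by
  cases st <;> simp [pvPush]

lemma pvPush_length_close (st : List Bool) : (pvPush st ')').length = st.length - 1 := by
  cases st <;> simp [pvPush]

lemma pvPush_other (st : List Bool) (c : Char) (h1 : c ≠ '(') (h2 : c ≠ ')') :
    pvPush st c = st := by simp [pvPush, h1, h2]

-- L1: pvGo succeeds exactly when the stack is deep enough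
lemma pvGo_isSome (r : List Char) : ∀ k : Nat, 1 ≤ k →
    ((pvGo k r).isSome ↔ k ≤ (pvStR r).length) := by
  induction r with
  | nil => intro k hk; simp [pvGo, pvStR]; omega
  | cons c t ih =>
    intro k hk
    rw [pvStR_cons]
    by_cases h1 : c = '('
    · subst h1
      rw [pvPush_length_open, pvGo_open]
      by_cases hk1 : k ≤ 1
      · simp [hk1]; omega
      · have h' := ih (k - 1) (by omega)
        rw [if_neg hk1, Option.isSome_map, h']
        omega
    · by_cases h2 : c = ')'
      · subst h2
        rw [pvPush_length_close, pvGo_close]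
        have h' := ih (k + 1) (by omega)
        rw [Option.isSome_map, h']
        omega
      · rw [pvPush_other _ _ h1 h2, pvGo_other _ _ _ h1 h2]
        have h' := ih k hk
        rw [Option.isSome_map, h']

-- L2: every flag below the top is true
lemma pvPush_tail_true (st : List Bool) (c : Char)
    (h : ∀ b ∈ st.tail, b = true) : ∀ b ∈ (pvPush st c).tail, b = true := by
  intro b hb
  by_cases h1 : c = '('
  · subst h1
    cases st with
    | nil => simp [pvPush] at hb
    | cons a t =>
      have hb' : b ∈ true :: t := by simpa [pvPush] using hb
      rcases List.mem_cons.mp hb' with rfl | hbt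
      · rfl
      · exact h b hbt
  · by_cases h2 : c = ')'
    · subst h2
      cases st with
      | nil => simp [pvPush, h1] at hb
      | cons a t =>
        have hb' : b ∈ t.tail := by simpa [pvPush, h1] using hb
        exact h b (List.mem_of_mem_tail hb')
    · rw [pvPush_other _ _ h1 h2] at hb; exact h b hb

lemma pvStR_tail_true (r : List Char) : ∀ b ∈ (pvStR r).tail, b = true := by
  induction r with
  | nil => simp [pvStR]
  | cons c t ih => rw [pvStR_cons]; exact pvPush_tail_true _ _ ih

-- L4: a prefix reaching balance k holds at least k opens
lemma pvGo_count (r : List Char) : ∀ (k : Nat) (p : List Char), 1 ≤ k →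
    pvGo k r = some p → k ≤ p.count '(' := by
  induction r with
  | nil => intro k p _ h; simp [pvGo] at h
  | cons c t ih =>
    intro k p hk h
    by_cases h1 : c = '('
    · subst h1
      rw [pvGo_open] at h
      by_cases hk1 : k ≤ 1
      · rw [if_pos hk1] at h
        cases h
        simp; omega
      · rw [if_neg hk1] at h
        obtain ⟨q, hq, rfl⟩ := Option.map_eq_some_iff.mp h
        have := ih (k - 1) q (by omega) hq
        simp [List.count_cons]
        omega
    · by_cases h2 : c = ')'
      · subst h2
        rw [pvGo_close] at h
        obtain ⟨q, hq, rfl⟩ := Option.map_eq_some_iff.mp h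
        have := ih (k + 1) q (by omega) hq
        simp [List.count_cons, h1]
        omega
      · rw [pvGo_other _ _ _ h1 h2] at h
        obtain ⟨q, hq, rfl⟩ := Option.map_eq_some_iff.mp h
        have := ih k q hk hq
        simp [List.count_cons, h1]
        omega

-- H: the ">1 opens in the current parenthetical" test, read off pvGo, equals the top flag
lemma pvGo_head (r : List Char) :
    (match pvGo 1 r with
     | some p => decide (p.count '(' > 1)
     | none => false) = (pvStR r).headD false := by
  induction r with
  | nil => simp [pvGo, pvStR]
  | cons c t ih =>
    rw [pvStR_cons]
    by_cases h1 : c = '('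
    · subst h1
      rw [pvGo_open, if_pos (by omega)]
      cases hst : pvStR t with
      | nil => simp [pvPush]
      | cons a t' => simp [pvPush]
    · by_cases h2 : c = ')'
      · subst h2
        rw [pvGo_close]
        have hlen := pvGo_isSome t (1 + 1) (by omega)
        cases hgo : pvGo (1 + 1) t with
        | none =>
          rw [hgo] at hlen
          simp only [Option.map_none]
          have hlt : ¬ (1 + 1) ≤ (pvStR t).length :=
            fun hge => absurd (hlen.mpr hge) (by simp)
          rcases hst : pvStR t with _ | ⟨a, _ | ⟨b, u⟩⟩
          · simp [pvPush, h1]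
          · simp [pvPush, h1]
          · rw [hst] at hlt; exact absurd (by simp) hlt
        | some q =>
          rw [hgo] at hlen
          simp only [Option.map_some]
          have h2le : (1 + 1) ≤ (pvStR t).length := hlen.mp (by simp)
          have hcnt := pvGo_count t (1 + 1) q (by omega) hgo
          rcases hst : pvStR t with _ | ⟨a, _ | ⟨b, u⟩⟩
          · rw [hst] at h2le; simp at h2le
          · rw [hst] at h2le; simp at h2le
          · have hb : b = true := by
              have := pvStR_tail_true t
              rw [hst] at this
              exact this b (by simp)
            subst hb
            simp only [pvPush, if_neg h1, reduceIte, List.tail_cons, List.headD_cons,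
              Option.map_some]
            simp [List.count_cons, h1]
            omega
      · rw [pvGo_other _ _ _ h1 h2, pvPush_other _ _ h1 h2]
        cases hgo : pvGo 1 t with
        | none => rw [hgo] at ih; simpa using ih
        | some q =>
          rw [hgo] at ih
          simpa [List.count_cons, h1] using ih

-- pvGo's output, when none: no prefix of r ever reaches balance k
lemma pvGo_none_spec (r : List Char) : ∀ k : Nat, 1 ≤ k → pvGo k r = none →
    ∀ i : Nat, pvBal (r.take i) < (k : Int) := by
  induction r with
  | nil => intro k hk _ i; simp [pvBal]; omega
  | cons c t ih =>
    intro k hk h i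
    cases i with
    | zero => simp [pvBal]; omega
    | succ j =>
      rw [List.take_succ_cons, pvBal_cons]
      by_cases h1 : c = '('
      · subst h1
        rw [pvGo_open] at h
        by_cases hk1 : k ≤ 1
        · rw [if_pos hk1] at h; cases h
        · rw [if_neg hk1, Option.map_eq_none_iff] at h
          have := ih (k - 1) (by omega) h j
          simp only [reduceIte]
          omega
      · by_cases h2 : c = ')'
        · subst h2
          rw [pvGo_close, Option.map_eq_none_iff] at h
          have := ih (k + 1) (by omega) h j
          simp only [if_neg h1, reduceIte]
          push_cast at this ⊢
          omega
        · rw [pvGo_other _ _ _ h1 h2, Option.map_eq_none_iff] at h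
          have := ih k hk h j
          simp only [if_neg h1, if_neg h2]
          omega

lemma pvGo_some_spec (r : List Char) : ∀ (k : Nat) (p : List Char), 1 ≤ k → pvGo k r = some p →
    p = r.take p.length ∧ 1 ≤ p.length ∧ p.length ≤ r.length ∧ (k : Int) ≤ pvBal p ∧
      ∀ j < p.length, pvBal (r.take j) < (k : Int) := by
  induction r with
  | nil => intro k p _ h; simp [pvGo] at h
  | cons c t ih =>
    intro k p hk h
    by_cases h1 : c = '('
    · subst h1
      rw [pvGo_open] at h
      by_cases hk1 : k ≤ 1
      · rw [if_pos hk1] at h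
        cases h
        refine ⟨by simp, by simp, by simp, ?_, ?_⟩
        · rw [pvBal_cons]; simp [pvBal_nil]; omega
        · intro j hj
          have : j = 0 := by simpa using hj
          subst this
          simp [pvBal_nil]; omega
      · rw [if_neg hk1] at h
        obtain ⟨q, hq, rfl⟩ := Option.map_eq_some_iff.mp h
        obtain ⟨hq1, hq2, hq3, hq4, hq5⟩ := ih (k - 1) q (by omega) hq
        refine ⟨?_, by simp, by simp; omega, ?_, ?_⟩
        · simp only [List.length_cons, List.take_succ_cons]
          exact congrArg _ hq1
        · rw [pvBal_cons]; simp only [reduceIte]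
          have : ((k - 1 : Nat) : Int) = (k : Int) - 1 := by omega
          omega
        · intro j hj
          cases j with
          | zero => simp [pvBal_nil]; omega
          | succ i =>
            rw [List.take_succ_cons, pvBal_cons]
            have := hq5 i (by simp at hj; omega)
            simp only [reduceIte]
            have hcast : ((k - 1 : Nat) : Int) = (k : Int) - 1 := by omega
            omega
    · by_cases h2 : c = ')'
      · subst h2
        rw [pvGo_close] at h
        obtain ⟨q, hq, rfl⟩ := Option.map_eq_some_iff.mp h
        obtain ⟨hq1, hq2, hq3, hq4, hq5⟩ := ih (k + 1) q (by omega) hq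
        refine ⟨?_, by simp, by simp; omega, ?_, ?_⟩
        · simp only [List.length_cons, List.take_succ_cons]
          exact congrArg _ hq1
        · rw [pvBal_cons]; simp only [if_neg h1, reduceIte]
          push_cast at hq4 ⊢
          omega
        · intro j hj
          cases j with
          | zero => simp [pvBal_nil]; omega
          | succ i =>
            rw [List.take_succ_cons, pvBal_cons]
            have := hq5 i (by simp at hj; omega)
            simp only [if_neg h1, reduceIte]
            push_cast at this ⊢
            omega
      · rw [pvGo_other _ _ _ h1 h2] at h
        obtain ⟨q, hq, rfl⟩ := Option.map_eq_some_iff.mp h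
        obtain ⟨hq1, hq2, hq3, hq4, hq5⟩ := ih k q hk hq
        refine ⟨?_, by simp, by simp; omega, ?_, ?_⟩
        · simp only [List.length_cons, List.take_succ_cons]
          exact congrArg _ hq1
        · rw [pvBal_cons]; simp only [if_neg h1, if_neg h2]; omega
        · intro j hj
          cases j with
          | zero => simp [pvBal_nil]; omega
          | succ i =>
            rw [List.take_succ_cons, pvBal_cons]
            have := hq5 i (by simp at hj; omega)
            simp only [if_neg h1, if_neg h2]
            omega

-- the slice game[-i:] is the reversed i-prefix of the reversed text
lemma pvSub_eq (s : List Char) (i : Nat) (hi : 1 ≤ i) :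
    PySem.List.slice s (some (-(i : Int))) none = (s.reverse.take i).reverse := by
  rw [PySem.List.slice_some_none, PySem.List.clampIdx_neg_natCast _ _ (by omega)]
  rw [List.take_reverse, List.reverse_reverse]

-- the loop of get_current_parenthetical when no suffix is open
lemma pvGcp_none (s : List Char) (hall : ∀ i : Nat, pvBal (s.reverse.take i) < 1) :
    ∀ (fuel i0 : Nat), s.length + 1 - i0 ≤ fuel → 1 ≤ i0 →
      get_current_parenthetical_go s i0 = [] := by
  intro fuel
  induction fuel with
  | zero =>
    intro i0 hf h1
    unfold get_current_parenthetical_go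
    rw [if_neg (by omega)]
  | succ f ihf =>
    intro i0 hf h1
    unfold get_current_parenthetical_go
    by_cases hle : i0 ≤ s.length
    · rw [if_pos hle]
      have hsub := pvSub_eq s i0 h1
      have hb := hall i0
      rw [if_neg ?_]
      · exact ihf (i0 + 1) (by omega) (by omega)
      · rw [hsub]
        simp only [List.count_reverse]
        simp only [pvBal] at hb
        omega
    · rw [if_neg hle]

-- the loop of get_current_parenthetical when the minimal open suffix has length m
lemma pvGcp_find (s : List Char) (m : Nat) (h1 : 1 ≤ m) (hm : m ≤ s.length)
    (hP : 1 ≤ pvBal (s.reverse.take m)) (hmin : ∀ j < m, pvBal (s.reverse.take j) < 1) :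
    ∀ (fuel i0 : Nat), m - i0 ≤ fuel → 1 ≤ i0 → i0 ≤ m →
      get_current_parenthetical_go s i0 = (s.reverse.take m).reverse := by
  intro fuel
  induction fuel with
  | zero =>
    intro i0 hf hi1 him
    have heq : i0 = m := by omega
    subst heq
    unfold get_current_parenthetical_go
    rw [if_pos (by omega), if_pos ?_]
    · exact pvSub_eq s i0 hi1
    · rw [pvSub_eq s i0 hi1]
      simp only [List.count_reverse]
      simp only [pvBal] at hP
      omega
  | succ f ihf =>
    intro i0 hf hi1 him
    by_cases heq : i0 = m
    · subst heq
      unfold get_current_parenthetical_go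
      rw [if_pos (by omega), if_pos ?_]
      · exact pvSub_eq s i0 hi1
      · rw [pvSub_eq s i0 hi1]
        simp only [List.count_reverse]
        simp only [pvBal] at hP
        omega
    · unfold get_current_parenthetical_go
      rw [if_pos (by omega), if_neg ?_]
      · exact ihf (i0 + 1) (by omega) (by omega) (by omega)
      · rw [pvSub_eq s i0 hi1]
        have := hmin i0 (by omega)
        simp only [List.count_reverse]
        simp only [pvBal] at this
        omega

-- the stack B maintains is the fold of pvPush over the text built so far
lemma pvStR_eq_foldl (s : List Char) : s.foldl pvPush [] = pvStR s.reverse := by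
  unfold pvStR
  rw [← List.foldl_reverse, List.reverse_reverse]

-- M: A's nesting test on the built text equals B's top flag
lemma pvCond_iff (s : List Char) :
    ((get_current_parenthetical s).count '(' > 1) ↔ ((s.foldl pvPush []).headD false = true) := by
  rw [pvStR_eq_foldl]
  have hH := pvGo_head s.reverse
  cases hgo : pvGo 1 s.reverse with
  | none =>
    rw [hgo] at hH
    have hall := pvGo_none_spec s.reverse 1 (by omega) hgo
    have hgcp : get_current_parenthetical s = [] :=
      pvGcp_none s hall (s.length + 1 - 1) 1 (by omega) (by omega)
    rw [hgcp]
    have hfalse : (pvStR s.reverse).headD false = false := by simpa using hH.symm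
    rw [List.headD_eq_head?_getD] at hfalse
    simp [hfalse]
  | some p =>
    rw [hgo] at hH
    obtain ⟨hp1, hp2, hp3, hp4, hp5⟩ := pvGo_some_spec s.reverse 1 p (by omega) hgo
    rw [List.length_reverse] at hp3
    have hgcp : get_current_parenthetical s = (s.reverse.take p.length).reverse :=
      pvGcp_find s p.length hp2 hp3 (by rw [← hp1]; omega) (fun j hj => hp5 j hj)
        (p.length - 1) 1 (by omega) (by omega) (by omega)
    rw [hgcp, ← hp1]
    simp only [List.count_reverse]
    rw [← hH]
    simp

lemma pvPush_newline (st : List Bool) : pvPush st '\n' = st := by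
  simp [pvPush]

-- one step of the two loops agree (given the stack invariant)
lemma pvStep_eq (ng : List Char) (q : Bool) (c : Char) :
    fslg_alt_step (ng, q, ng.foldl pvPush []) c =
      ((fslg_step (ng, q) c).1, (fslg_step (ng, q) c).2,
        (fslg_step (ng, q) c).1.foldl pvPush []) := by
  unfold fslg_step fslg_alt_step
  by_cases hc1 : c = '('
  · subst hc1
    cases q <;>
      simp [List.foldl_append, pvPush_newline, pvPush]
  · by_cases hc2 : c = ')'
    · subst hc2
      cases q with
      | true => simp [List.foldl_append, pvPush_newline]
      | false =>
        have hcond := pvCond_iff ng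
        by_cases hgt : (get_current_parenthetical ng).count '(' > 1
        · have hhd : (ng.foldl pvPush []).headD false = true := hcond.mp hgt
          rw [List.headD_eq_head?_getD] at hhd
          simp [hgt, hhd, List.foldl_append, pvPush_newline]
        · have hhd : ((ng.foldl pvPush []).headD false) = false := by
            cases h : (ng.foldl pvPush []).headD false
            · rfl
            · exact absurd (hcond.mpr h) hgt
          rw [List.headD_eq_head?_getD] at hhd
          simp [hgt, hhd, List.foldl_append, pvPush_newline]
    · cases hqv : (if c = '"' then !q else q) <;>
        simp [hc1, hc2, hqv, List.foldl_append, pvPush_other _ _ hc1 hc2]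

-- the two loops agree along the whole input
lemma pvLoop_eq (l : List Char) : ∀ (ng : List Char) (q : Bool),
    l.foldl fslg_alt_step (ng, q, ng.foldl pvPush []) =
      ((l.foldl fslg_step (ng, q)).1, (l.foldl fslg_step (ng, q)).2,
        (l.foldl fslg_step (ng, q)).1.foldl pvPush []) := by
  induction l with
  | nil => intro ng q; simp
  | cons c t ih =>
    intro ng q
    simp only [List.foldl_cons]
    rw [pvStep_eq]
    exact ih _ _

-- ===== line-pass fusion =====

lemma pvLJ_eq (l : List Char) : left_justify l = l.dropWhile (fun c => c == ' ' || c == '\t') := by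
  induction l with
  | nil => rfl
  | cons c t ih =>
    by_cases h : c = ' ' ∨ c = '\t'
    · rw [left_justify, if_pos h, List.dropWhile_cons_of_pos (by rcases h with h | h <;> simp [h])]
      exact ih
    · rw [left_justify, if_neg h, List.dropWhile_cons_of_neg (by push_neg at h; simp [h])]

lemma pvFlat_comm (n : Nat) :
    (List.replicate n "    ".toList).flatten ++ "    ".toList =
      "    ".toList ++ (List.replicate n "    ".toList).flatten := by
  induction n with
  | zero => simp
  | succ m ih => simp only [List.replicate_succ, List.flatten_cons, List.append_assoc, ih]

lemma pvPad_eq (n : Nat) : ∀ l : List Char,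
    pvPadA n l = (List.replicate n "    ".toList).flatten ++ l := by
  induction n with
  | zero => intro l; simp [pvPadA]
  | succ m ih =>
    intro l
    rw [pvPadA, ih, List.replicate_succ, List.flatten_cons]
    rw [← List.append_assoc, ← pvFlat_comm, List.append_assoc]

lemma pvStrip_space (l : List Char) :
    PySem.Chars.strip (' ' :: l) = PySem.Chars.strip l := by
  simp [PySem.Chars.strip, PySem.Chars.lstrip, List.dropWhile_cons, PySem.Chars.isspace]

lemma pvStrip_pad (n : Nat) (l : List Char) :
    PySem.Chars.strip ((List.replicate n "    ".toList).flatten ++ l) = PySem.Chars.strip l := by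
  induction n with
  | zero => simp
  | succ m ih =>
    rw [List.replicate_succ, List.flatten_cons, List.append_assoc]
    show PySem.Chars.strip (' ' :: ' ' :: ' ' :: ' ' :: ((List.replicate m "    ".toList).flatten ++ l)) = _
    rw [pvStrip_space, pvStrip_space, pvStrip_space, pvStrip_space, ih]

lemma pvMax_eq (x : Int) : (if x < 0 then 0 else x) = max x 0 := by
  split_ifs with h <;> omega

-- F: B's fused pass equals A's filter + left-justify + indent + spacing passes
lemma pvFusion (ls : List (List Char)) : ∀ ind : Int,
    alt_lines_go ind ls =
      (indent_lines_go ind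
        ((ls.filter (fun l => PySem.Chars.strip l != ([] : List Char))).map left_justify)).map
        spacingA := by
  induction ls with
  | nil => intro ind; simp [alt_lines_go, indent_lines_go]
  | cons raw rest ih =>
    intro ind
    by_cases hb : PySem.Chars.strip raw = []
    · rw [alt_lines_go, if_pos (by simpa using hb),
        List.filter_cons_of_neg (by simpa using hb)]
      exact ih ind
    · rw [alt_lines_go, if_neg (by simpa using hb),
        List.filter_cons_of_pos (by simpa using hb), List.map_cons (f := left_justify)]
      rw [indent_lines_go]
      rw [List.map_cons (f := spacingA), ← pvLJ_eq]
      simp only [spacingA, pvDiffA, pvPad_eq, ADDITIONAL_SPACING_TOKENS, pvStrip_pad, pvMax_eq]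
      rw [ih]

-- ===== VERDICT (by name: the statement is the Claim_ definition above) =====
theorem format_single_line_game_spec : Claim_equal_format_single_line_game := by
  intro game _
  unfold Spec_format_single_line_game
  have hloop := pvLoop_eq (game.toList.drop 1) ['('] false
  have hinit : (['('] : List Char).foldl pvPush [] = [false] := rfl
  rw [hinit] at hloop
  have hfst : ((game.toList.drop 1).foldl fslg_alt_step (['('], false, [false])).1
      = ((game.toList.drop 1).foldl fslg_step (['('], false)).1 := by
    rw [hloop]
  have hA : format_single_line_game game =
      String.mk (PySem.Chars.join ['\n']
        ((indent_lines_go 0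
          (((PySem.Chars.splitOn ((game.toList.drop 1).foldl fslg_step (['('], false)).1
              ['\n']).filter (fun l => PySem.Chars.strip l != ([] : List Char))).map
            left_justify)).map spacingA)) := rfl
  have hB : format_single_line_game_alt game =
      String.mk (PySem.Chars.join ['\n']
        (alt_lines_go 0 (PySem.Chars.splitOn
          ((game.toList.drop 1).foldl fslg_alt_step (['('], false, [false])).1 ['\n']))) := rfl
  rw [hA, hB, hfst, pvFusion]
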